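-- pv_equiv track=rewrite | github.com/lnxhigh/Baekjoon | 프로그래머스/0/120956. 옹알이 （1）/옹알이 （1）.py | solution
-- ===== SOURCE A (Python) =====
-- import itertools
--
-- def solution(babbling):
--     words = ["aya", "ye", "woo", "ma"]
--     n = len(words)
--     allWords = set()
--
--     for perm in itertools.permutations(words):
--         for bit in range(1 << n):
--             subWords = [perm[i] if (1 << i) & bit else "" for i in range(n)]
--             allWords.add("".join(subWords))
--
--     res = [True if word in allWords else False for word in babbling]
--     return sum(res)
-- ===== SOURCE B (Python) =====
-- def solution(babbling):
--     sounds = ["aya", "ye", "woo", "ma"]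
--
--     def ok(s, avail):
--         if s == "":
--             return True
--         for w in avail:
--             if s.startswith(w) and ok(s[len(w):], [x for x in avail if x != w]):
--                 return True
--         return False
--
--     return sum(1 for word in babbling if ok(word, sounds))
-- ===== Notes on version B (the rewrite author's own statement) =====
-- stated objective: alternative
-- what changed: B replaces A's precomputation of all 384 permutation-subset concatenations into a set (then membership lookup) with a per-word recursive backtracking parse that threads the set of still-available sounds, trying each available sound as a prefix.
import Mathlib
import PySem

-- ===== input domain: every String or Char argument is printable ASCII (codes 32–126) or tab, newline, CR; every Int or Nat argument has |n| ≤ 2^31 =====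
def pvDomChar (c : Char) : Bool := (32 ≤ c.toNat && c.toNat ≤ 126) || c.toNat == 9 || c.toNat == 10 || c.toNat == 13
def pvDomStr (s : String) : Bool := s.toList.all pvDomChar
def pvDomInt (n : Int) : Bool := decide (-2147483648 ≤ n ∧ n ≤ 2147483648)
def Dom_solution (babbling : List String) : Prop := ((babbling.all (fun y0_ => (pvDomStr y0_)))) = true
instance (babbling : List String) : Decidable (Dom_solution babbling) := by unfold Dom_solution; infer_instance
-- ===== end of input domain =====

-- B counts each word by a recursive backtracking parse threading the still-available sounds,
-- instead of A's precomputation of all permutation-subset concatenations into a set; objective: alternative.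

-- ===== PORT A =====
def pvWordsA : List String := ["aya", "ye", "woo", "ma"]

-- allWords: for perm in permutations(words): for bit in range(1 << n): add "".join(subWords)
def pvAllWordsA : PySem.Set String :=
  (PySem.List.permutations pvWordsA pvWordsA.length).foldl
    (fun aw perm =>
      (PySem.List.pyRange 0 (1 <<< pvWordsA.length) 1).foldl
        (fun aw2 bit =>
          PySem.Set.add aw2 (PySem.Str.join ""
            ((List.range pvWordsA.length).map
              (fun i => if PySem.Int.band ((1 : Int) <<< i) bit ≠ 0
                        then PySem.List.pyGetD perm (i : Int) "" else ""))))
        aw)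
    PySem.Set.empty

def solution (babbling : List String) : Int :=
  let res := babbling.map (fun word => if PySem.Set.contains pvAllWordsA word then true else false)
  (res.map (fun b => if b then (1 : Int) else 0)).sum

-- ===== PORT B =====
def pvSoundsB : List String := ["aya", "ye", "woo", "ma"]

-- recursive parse ok(s, avail); fuel = avail.length makes the recursion structural (every
-- recursive call strictly shrinks avail, so the fuel never runs out before avail does)
def okAux : Nat → String → List String → Bool
  | 0, s, _ => s == ""
  | n + 1, s, avail =>
    if s == "" then true
    else avail.any (fun w =>
      PySem.Str.startswith s w &&
      okAux n (PySem.Str.slice s (some (PySem.Str.len w)) none) (avail.filter (fun x => x ≠ w)))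

def ok (s : String) (avail : List String) : Bool := okAux avail.length s avail

def solution_alt (babbling : List String) : Int :=
  babbling.foldl (fun acc word => if ok word pvSoundsB then acc + 1 else acc) 0

-- ===== PRECONDITION & SPEC =====
def Spec_solution (babbling : List String) (out : Int) : Prop := out = solution_alt babbling
instance (babbling : List String) (out : Int) : Decidable (Spec_solution babbling out) := by unfold Spec_solution; infer_instance

-- ===== CLAIM (what is proved, stated in full; the proofs are below) =====
def Claim_equal_solution : Prop := ∀ (babbling : List String), Dom_solution babbling → Spec_solution babbling (solution babbling)

-- ===== LEMMAS AND PROOFS =====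

-- the language recognised by okAux with fuel n: joins of sequences of pairwise-distinct
-- available sounds (at most n of them), as lists of chars
def pvLang : Nat → List String → List (List Char)
  | 0, _ => [[]]
  | n + 1, avail =>
    [] :: avail.flatMap (fun w =>
      (pvLang n (avail.filter (fun x => x ≠ w))).map (fun t => w.toList ++ t))

-- the concrete value of A's set, in insertion order
def pvAWLit : List String := ["", "aya", "ye", "ayaye", "woo", "ayawoo", "yewoo", "ayayewoo", "ma", "ayama", "yema", "ayayema", "wooma", "ayawooma", "yewooma", "ayayewooma", "mawoo", "ayamawoo", "yemawoo", "ayayemawoo", "wooye", "ayawooye", "wooyema", "ayawooyema", "maye", "ayamaye", "woomaye", "ayawoomaye", "mayewoo", "ayamayewoo", "mawooye", "ayamawooye", "yeaya", "yeayawoo", "yeayama", "yeayawooma", "yeayamawoo", "wooaya", "yewooaya", "wooayama", "yewooayama", "maaya", "yemaaya", "woomaaya", "yewoomaaya", "maayawoo", "yemaayawoo", "mawooaya", "yemawooaya", "wooayaye", "wooayayema", "wooayamaye", "wooyeaya", "wooyeayama", "wooyemaaya", "maayaye", "woomaayaye", "mayeaya", "woomayeaya", "maayayewoo", "maayawooye",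 "mayeayawoo", "mayewooaya", "mawooayaye", "mawooyeaya"]

set_option maxHeartbeats 4000000 in
set_option maxRecDepth 100000 in
lemma pvAW_eq : pvAllWordsA = pvAWLit := by decide

lemma pvSlice_toList (s w : String) :
    (PySem.Str.slice s (some (PySem.Str.len w)) none).toList = s.toList.drop w.toList.length := by
  simp [PySem.Str.toList_slice, PySem.Str.len_eq, PySem.List.slice_from_natCast]

lemma pvOkAux_iff (n : Nat) : ∀ (s : String) (avail : List String),
    okAux n s avail = true ↔ s.toList ∈ pvLang n avail := by
  induction n with
  | zero =>
    intro s avail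
    simp [okAux, pvLang, String.toList_eq_nil_iff]
  | succ n ih =>
    intro s avail
    simp only [okAux, pvLang]
    by_cases hs : s = ""
    · subst hs; simp
    · rw [if_neg (by simpa using hs)]
      have hsne : s.toList ≠ [] := fun h => hs (String.toList_eq_nil_iff.mp h)
      simp only [List.any_eq_true, Bool.and_eq_true, List.mem_cons, List.mem_flatMap,
        List.mem_map, PySem.Str.startswith_eq, PySem.Chars.startswith_iff]
      constructor
      · rintro ⟨w, hw, hpre, hok⟩
        right
        have hmem := (ih _ _).mp hok
        rw [pvSlice_toList] at hmem
        obtain ⟨t, ht⟩ := hpre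
        refine ⟨w, hw, s.toList.drop w.toList.length, hmem, ?_⟩
        rw [← ht, List.drop_left]
      · rintro (h | ⟨w, hw, t, ht, hst⟩)
        · exact absurd h hsne
        · refine ⟨w, hw, ⟨t, hst⟩, (ih _ _).mpr ?_⟩
          rw [pvSlice_toList, ← hst, List.drop_left]
          exact ht

set_option maxHeartbeats 4000000 in
set_option maxRecDepth 100000 in
lemma pvLit_to_lang : ∀ x ∈ pvAWLit, x.toList ∈ pvLang 4 pvSoundsB := by decide

set_option maxHeartbeats 4000000 in
set_option maxRecDepth 100000 in
lemma pvLang_to_lit : ∀ t ∈ pvLang 4 pvSoundsB, String.ofList t ∈ pvAWLit := by decide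

-- the concrete set A computes and the concrete language B parses have the same members
lemma pvMem_equiv (s : String) : s ∈ pvAllWordsA ↔ s.toList ∈ pvLang 4 pvSoundsB := by
  rw [pvAW_eq]
  constructor
  · exact fun h => pvLit_to_lang s h
  · intro h
    have := pvLang_to_lit s.toList h
    rwa [String.ofList_toList] at this

lemma pvContains_eq (w : String) :
    PySem.Set.contains pvAllWordsA w = ok w pvSoundsB := by
  rw [Bool.eq_iff_iff, PySem.Set.contains_iff]
  show w ∈ pvAllWordsA ↔ okAux 4 w pvSoundsB = true
  rw [pvOkAux_iff]
  exact pvMem_equiv w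

-- ===== VERDICT (by name: the statement is the Claim_ definition above) =====
set_option maxRecDepth 100000 in
set_option maxHeartbeats 1000000 in
theorem solution_spec : Claim_equal_solution := by
  intro bab _
  show solution bab = solution_alt bab
  unfold solution solution_alt
  simp only [pvContains_eq]
  rw [PySem.List.foldl_count_if (fun w => ok w pvSoundsB) bab 0]
  rw [List.map_map]
  have hc : ((fun b => if b = true then (1 : Int) else 0) ∘
      (fun word => if ok word pvSoundsB = true then true else false)) =
      (fun w => if ok w pvSoundsB = true then (1 : Int) else 0) := by
    funext w
    by_cases h : ok w pvSoundsB <;> simp [h]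
  rw [hc, PySem.List.sum_map_ite_one_zero (fun w => ok w pvSoundsB) bab]
  omega
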